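-- pv_equiv track=rewrite | github.com/micsthepick/TetrisCubeSolver | TetrisC.py | transform
-- ===== SOURCE A (Python) =====
-- from itertools import product
--
-- def transform(piece, axes, negatives):
--     hl = len(piece)
--     rl = len(piece[0])
--     cl = len(piece[0][0])
--     dim = [hl, rl, cl]
--     new = []
--     hn, rn, cn = axes
--     for h in range(dim[hn]):
--         new.append([])
--         for r in range(dim[rn]):
--             new[-1].append('')
--     num_axes = []
--     axes_indices = [0] * 3
--     for i in range(3):
--         axes_indices[axes[i]] = i
--         if negatives[i] == 0:
--             num_axes.append(range(dim[axes[i]]))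
--         else:
--             num_axes.append(range(dim[axes[i]] - 1, -1, -1))
--     hi, ri, ci = axes_indices
--     for a, b in zip(
--         product(range(dim[hn]), range(dim[rn]), range(dim[cn])),
--         product(*num_axes)
--     ):
--         new[a[0]][a[1]] += str(piece[b[hi]][b[ri]][b[ci]])
--     return new
-- ===== SOURCE B (Python) =====
-- def transform(piece, axes, negatives):
--     # Two staged passes instead of A's single fused pass: (1) a pure axis-permutation
--     # gather with no flip arithmetic and no negatives logic anywhere, then (2) whole-
--     # structure reversals of the output along each negated axis.
--     dim = [len(piece), len(piece[0]), len(piece[0][0])]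
--     inv = [0, 0, 0]
--     for i, a in enumerate(axes):
--         inv[a] = i
--     hi, ri, ci = inv
--     out = [[''.join(piece[(h, r, c)[hi]][(h, r, c)[ri]][(h, r, c)[ci]]
--                     for c in range(dim[axes[2]]))
--             for r in range(dim[axes[1]])]
--            for h in range(dim[axes[0]])]
--     if negatives[0] != 0:
--         out = out[::-1]
--     if negatives[1] != 0:
--         out = [row[::-1] for row in out]
--     if negatives[2] != 0:
--         out = [[s[::-1] for s in row] for row in out]
--     return out
-- ===== Notes on version B (the rewrite author's own statement) =====
-- stated objective: alternative
-- what changed: B replaces A's single fused pass (paired itertools products zipped together, reversed ranges for negated axes, per-cell flip arithmetic into a pre-sized mutable grid) by two staged passes: a pure axis-permutation gather with no negatives logic at all, followed by whole-structure reversals of the output along each negated axis.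
import Mathlib
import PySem

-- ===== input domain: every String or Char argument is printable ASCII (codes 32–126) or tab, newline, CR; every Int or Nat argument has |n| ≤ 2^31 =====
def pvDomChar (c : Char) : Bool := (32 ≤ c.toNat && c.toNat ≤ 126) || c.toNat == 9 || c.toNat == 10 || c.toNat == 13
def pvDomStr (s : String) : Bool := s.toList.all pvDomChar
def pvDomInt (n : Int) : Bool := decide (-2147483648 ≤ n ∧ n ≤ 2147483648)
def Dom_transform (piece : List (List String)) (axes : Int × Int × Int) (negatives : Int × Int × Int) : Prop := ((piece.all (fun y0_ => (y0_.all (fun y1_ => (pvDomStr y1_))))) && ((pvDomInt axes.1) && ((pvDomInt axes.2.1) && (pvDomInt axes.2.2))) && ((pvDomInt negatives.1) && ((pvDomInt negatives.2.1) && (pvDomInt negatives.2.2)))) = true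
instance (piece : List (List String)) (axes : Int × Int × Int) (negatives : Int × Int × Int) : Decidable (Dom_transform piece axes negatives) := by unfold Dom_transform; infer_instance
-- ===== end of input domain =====

-- B re-implements the axis permutation/reflection as two staged passes — a pure
-- axis-permutation gather with no flip arithmetic, then whole-structure reversals of
-- the output along each negated axis — instead of A's single fused pass over output
-- cells through paired itertools products; same cost ('alternative', not faster).

-- shared indexing primitive: str(piece[x][y][z]) for Int indices (both Pythons do this
-- exact three-level subscript in A / the same value arises structurally in B)
def pvStr1 (piece : List (List String)) (x y z : Int) : String :=
  match PySem.Str.pyGet? (PySem.List.pyGetD (PySem.List.pyGetD piece x []) y "") z with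
  | some c => String.ofList [c]
  | none => ""

-- ===== PORT A =====
def transform (piece : List (List String)) (axes : Int × Int × Int) (negatives : Int × Int × Int) : List (List String) :=
  let hl : Int := piece.length
  let rl : Int := (PySem.List.pyGetD piece 0 []).length
  let cl : Int := PySem.Str.len (PySem.List.pyGetD (PySem.List.pyGetD piece 0 []) 0 "")
  let dim : List Int := [hl, rl, cl]
  let hn := axes.1
  let rn := axes.2.1
  let cn := axes.2.2
  -- new = [['' for r in range(dim[rn])] for h in range(dim[hn])] via append loops
  let new0 : List (List String) :=
    (PySem.List.pyRange 0 (PySem.List.pyGetD dim hn 0) 1).foldl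
      (fun acc _ =>
        acc ++ [(PySem.List.pyRange 0 (PySem.List.pyGetD dim rn 0) 1).foldl
          (fun row _ => row ++ [""]) []]) []
  let axesL : List Int := [hn, rn, cn]
  let negL : List Int := [negatives.1, negatives.2.1, negatives.2.2]
  -- the i-loop building axes_indices and num_axes
  let st : List Int × List (List Int) :=
    (PySem.List.pyRange 0 3 1).foldl
      (fun st i =>
        let ai := PySem.List.pyGetD axesL i 0
        (PySem.List.pySetD st.1 ai i,
         st.2 ++ [if PySem.List.pyGetD negL i 0 = 0 then
             PySem.List.pyRange 0 (PySem.List.pyGetD dim ai 0) 1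
           else
             PySem.List.pyRange (PySem.List.pyGetD dim ai 0 - 1) (-1) (-1)]))
      ([0, 0, 0], [])
  let hi := PySem.List.pyGetD st.1 0 0
  let ri := PySem.List.pyGetD st.1 1 0
  let ci := PySem.List.pyGetD st.1 2 0
  let prodA : List (Int × Int × Int) :=
    (PySem.List.pyRange 0 (PySem.List.pyGetD dim hn 0) 1).flatMap fun a0 =>
      (PySem.List.pyRange 0 (PySem.List.pyGetD dim rn 0) 1).flatMap fun a1 =>
        (PySem.List.pyRange 0 (PySem.List.pyGetD dim cn 0) 1).map fun a2 => (a0, a1, a2)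
  let prodB : List (Int × Int × Int) :=
    (PySem.List.pyGetD st.2 0 []).flatMap fun b0 =>
      (PySem.List.pyGetD st.2 1 []).flatMap fun b1 =>
        (PySem.List.pyGetD st.2 2 []).map fun b2 => (b0, b1, b2)
  (prodA.zip prodB).foldl
    (fun grid ab =>
      let bL : List Int := [ab.2.1, ab.2.2.1, ab.2.2.2]
      PySem.List.pySetD grid ab.1.1
        (PySem.List.pySetD (PySem.List.pyGetD grid ab.1.1 []) ab.1.2.1
          (PySem.List.pyGetD (PySem.List.pyGetD grid ab.1.1 []) ab.1.2.1 "" ++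
            pvStr1 piece (PySem.List.pyGetD bL hi 0) (PySem.List.pyGetD bL ri 0)
              (PySem.List.pyGetD bL ci 0))))
    new0

-- ===== PORT B =====
def transform_alt (piece : List (List String)) (axes : Int × Int × Int) (negatives : Int × Int × Int) : List (List String) :=
  let dim : List Int := [(piece.length : Int), ((PySem.List.pyGetD piece 0 []).length : Int),
    PySem.Str.len (PySem.List.pyGetD (PySem.List.pyGetD piece 0 []) 0 "")]
  -- inv = [0,0,0]; for i, a in enumerate(axes): inv[a] = i
  let inv : List Int :=
    (PySem.List.enumerate [axes.1, axes.2.1, axes.2.2]).foldl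
      (fun acc ia => PySem.List.pySetD acc ia.2 ia.1) [0, 0, 0]
  let hi := inv.getD 0 0
  let ri := inv.getD 1 0
  let ci := inv.getD 2 0
  -- stage 1: pure gather; ''.join over the chars is String.join of the char list
  let out0 : List (List String) :=
    (PySem.List.pyRange 0 (PySem.List.pyGetD dim axes.1 0) 1).map fun h =>
      (PySem.List.pyRange 0 (PySem.List.pyGetD dim axes.2.1 0) 1).map fun r =>
        String.join ((PySem.List.pyRange 0 (PySem.List.pyGetD dim axes.2.2 0) 1).map fun c =>
          pvStr1 piece (PySem.List.pyGetD [h, r, c] hi 0) (PySem.List.pyGetD [h, r, c] ri 0)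
            (PySem.List.pyGetD [h, r, c] ci 0))
  -- stage 2: out[::-1] is reverse (PySem.List.slice?_none_none_neg_one),
  -- s[::-1] is String.ofList s.toList.reverse (PySem.Str.slice?_none_none_neg_one)
  let out1 := if negatives.1 ≠ 0 then out0.reverse else out0
  let out2 := if negatives.2.1 ≠ 0 then out1.map (fun row => row.reverse) else out1
  if negatives.2.2 ≠ 0 then
    out2.map (fun row => row.map (fun s => String.ofList s.toList.reverse))
  else out2

-- ===== PRECONDITION & SPEC =====
-- helper shapes for Pre_: the dimension selected by a (possibly negative,
-- Python-wraparound) axis index, and the inverse axis map exactly as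
-- last-write-wins assignment produces it
def pvDimAt (piece : List (List String)) (v : Int) : Nat :=
  if v = 0 ∨ v = -3 then piece.length
  else if v = 1 ∨ v = -2 then (piece.getD 0 []).length
  else ((piece.getD 0 []).getD 0 "").toList.length
def pvInvAt (axes : Int × Int × Int) (j : Int) : Nat :=
  if axes.2.2 = j ∨ axes.2.2 = j - 3 then 2
  else if axes.2.1 = j ∨ axes.2.1 = j - 3 then 1 else 0

-- Pre_ holds exactly on the inputs where Python A returns normally: nonempty piece and
-- first row, every axes component in -3..2, and every cell access the loop performs in
-- range (the quantifier ranges over the very index box A iterates).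
def Pre_transform (piece : List (List String)) (axes : Int × Int × Int) (negatives : Int × Int × Int) : Prop :=
  piece ≠ [] ∧ piece.getD 0 [] ≠ [] ∧
  (-3 ≤ axes.1 ∧ axes.1 < 3) ∧ (-3 ≤ axes.2.1 ∧ axes.2.1 < 3) ∧ (-3 ≤ axes.2.2 ∧ axes.2.2 < 3) ∧
  (∀ b0 ∈ List.range (pvDimAt piece axes.1), ∀ b1 ∈ List.range (pvDimAt piece axes.2.1),
    ∀ b2 ∈ List.range (pvDimAt piece axes.2.2),
      [b0, b1, b2].getD (pvInvAt axes 0) 0 < piece.length ∧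
      [b0, b1, b2].getD (pvInvAt axes 1) 0 <
        (piece.getD ([b0, b1, b2].getD (pvInvAt axes 0) 0) []).length ∧
      [b0, b1, b2].getD (pvInvAt axes 2) 0 <
        ((piece.getD ([b0, b1, b2].getD (pvInvAt axes 0) 0) []).getD
          ([b0, b1, b2].getD (pvInvAt axes 1) 0) "").toList.length)
instance (piece : List (List String)) (axes : Int × Int × Int) (negatives : Int × Int × Int) : Decidable (Pre_transform piece axes negatives) := by unfold Pre_transform; infer_instance

def pvWitness_transform : List (List String) × (Int × Int × Int) × (Int × Int × Int) :=
  ([["ab", "cd"], ["ef", "gh"]], (2, 0, 1), (0, 1, 0))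

def Spec_transform (piece : List (List String)) (axes : Int × Int × Int) (negatives : Int × Int × Int) (out : List (List String)) : Prop := out = transform_alt piece axes negatives
instance (piece : List (List String)) (axes : Int × Int × Int) (negatives : Int × Int × Int) (out : List (List String)) : Decidable (Spec_transform piece axes negatives out) := by unfold Spec_transform; infer_instance

-- ===== CLAIM (what is proved, stated in full; the proofs are below) =====
def Claim_equal_transform : Prop := ∀ (piece : List (List String)) (axes : Int × Int × Int) (negatives : Int × Int × Int), Dom_transform piece axes negatives → Pre_transform piece axes negatives → Spec_transform piece axes negatives (transform piece axes negatives)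

-- ===== LEMMAS AND PROOFS =====

-- ---- A-side machinery (loop shapes) ----
theorem pv_foldl_flatMap {α β γ : Type} (l : List α) (g : α → List β) (f : γ → β → γ) (init : γ) :
    (l.flatMap g).foldl f init = l.foldl (fun a x => (g x).foldl f a) init := by
  induction l generalizing init with
  | nil => rfl
  | cons x l ih => simp [List.flatMap_cons, List.foldl_append, ih]

theorem pv_fold_set {β γ : Type} (l : List γ) (u : γ → β → β) (d : β) (i : Nat) :
    ∀ xs : List β, l.foldl (fun b x => b.set i (u x (b.getD i d))) xs
      = xs.set i (l.foldl (fun s x => u x s) (xs.getD i d)) := by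
  induction l with
  | nil =>
    intro xs
    simp only [List.foldl_nil]
    by_cases h : i < xs.length
    · rw [List.getD_eq_getElem xs d h, List.set_getElem_self]
    · rw [List.set_eq_of_length_le (by omega)]
  | cons x l ih =>
    intro xs
    by_cases h : i < xs.length
    · simp only [List.foldl_cons, ih]
      rw [List.set_set, List.getD_eq_getElem _ d (by simpa using h), List.getElem_set_self]
    · have hs : ∀ v, xs.set i v = xs := fun v => List.set_eq_of_length_le (by omega)
      simp only [List.foldl_cons, ih, hs]

theorem pv_fold_set_range {β : Type} (d : β) (T : Nat → β → β) :
    ∀ (n : Nat) (g0 : List β), n ≤ g0.length →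
      (List.range n).foldl (fun g h => g.set h (T h (g.getD h d))) g0
        = ((List.range n).map fun h => T h (g0.getD h d)) ++ g0.drop n := by
  intro n
  induction n with
  | zero => intro g0 _; simp
  | succ n ih =>
    intro g0 hn
    rw [List.range_succ, List.foldl_append, ih g0 (by omega)]
    have hlen : ((List.range n).map fun h => T h (g0.getD h d)).length = n := by simp
    have hget : (((List.range n).map fun h => T h (g0.getD h d)) ++ g0.drop n).getD n d = g0.getD n d := by
      rw [List.getD_eq_getElem?_getD, List.getElem?_append_right (by omega), hlen]
      simp [List.getElem?_drop, List.getD_eq_getElem?_getD]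
    have hdrop : g0.drop n = g0[n] :: g0.drop (n+1) := List.drop_eq_getElem_cons (by omega)
    simp only [List.foldl_cons, List.foldl_nil, hget]
    rw [List.set_append_right n _ (by omega), hlen, Nat.sub_self, hdrop, List.set_cons_zero]
    simp

theorem pv_rev_range (n : Nat) :
    PySem.List.pyRange ((n : Int) - 1) (-1) (-1) = (PySem.List.pyRange 0 (n : Int) 1).map fun a => (n : Int) - 1 - a := by
  rw [PySem.List.pyRange_neg_one, PySem.List.pyRange_one]
  have h1 : ((n : Int) - 1 - -1).toNat = n := by omega
  have h2 : ((n : Int) - 0).toNat = n := by omega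
  rw [h1, h2, List.map_map]
  exact List.map_congr_left fun k _ => by simp [Function.comp]

theorem pv_numax (n : Nat) (c : Prop) [Decidable c] :
    (if c then PySem.List.pyRange 0 (n : Int) 1 else PySem.List.pyRange ((n : Int) - 1) (-1) (-1))
      = (PySem.List.pyRange 0 (n : Int) 1).map fun a => if c then a else (n : Int) - 1 - a := by
  by_cases h : c
  · simp [h]
  · simp [h, pv_rev_range]

theorem pv_zip_self_map {α β : Type} (l : List α) (g : α → β) :
    l.zip (l.map g) = l.map fun x => (x, g x) := by
  induction l with
  | nil => rfl
  | cons x l ih => simp [ih]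

theorem pv_prod_map {α β : Type} (l0 l1 l2 : List α) (g0 g1 g2 : α → β) :
    ((l0.map g0).flatMap fun b0 => ((l1.map g1).flatMap fun b1 => ((l2.map g2).map fun b2 => (b0, b1, b2))))
      = ((l0.flatMap fun a0 => (l1.flatMap fun a1 => (l2.map fun a2 => (a0, a1, a2))))).map
          fun x => (g0 x.1, g1 x.2.1, g2 x.2.2) := by
  simp [List.flatMap_map, List.map_flatMap, List.map_map, Function.comp_def]

theorem pv_core (n0 n1 n2 : Nat) (G : Nat → Nat → Nat → String) :
    ((List.range n0).flatMap fun h => (List.range n1).flatMap fun r => (List.range n2).map fun c => (h, r, c)).foldl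
      (fun grid (x : Nat × Nat × Nat) =>
        grid.set x.1 ((grid.getD x.1 []).set x.2.1 (((grid.getD x.1 []).getD x.2.1 "") ++ G x.1 x.2.1 x.2.2)))
      ((List.range n0).map fun _ => (List.range n1).map fun _ => "")
    = (List.range n0).map fun h => (List.range n1).map fun r =>
        (List.range n2).foldl (fun s c => s ++ G h r c) "" := by
  rw [pv_foldl_flatMap]
  have hstep : ∀ (h : Nat) (grid : List (List String)),
      ((List.range n1).flatMap fun r => (List.range n2).map fun c => (h, r, c)).foldl
        (fun grid (x : Nat × Nat × Nat) =>
          grid.set x.1 ((grid.getD x.1 []).set x.2.1 (((grid.getD x.1 []).getD x.2.1 "") ++ G x.1 x.2.1 x.2.2))) grid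
      = grid.set h ((List.range n1).foldl
          (fun b r => b.set r ((List.range n2).foldl (fun s c => s ++ G h r c) (b.getD r ""))) (grid.getD h [])) := by
    intro h grid
    rw [pv_foldl_flatMap]
    have hr : ∀ (r : Nat) (grid : List (List String)),
        ((List.range n2).map fun c => (h, r, c)).foldl
          (fun grid (x : Nat × Nat × Nat) =>
            grid.set x.1 ((grid.getD x.1 []).set x.2.1 (((grid.getD x.1 []).getD x.2.1 "") ++ G x.1 x.2.1 x.2.2))) grid
        = grid.set h ((List.range n2).foldl
            (fun row c => row.set r (row.getD r "" ++ G h r c)) (grid.getD h [])) := by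
      intro r grid
      rw [List.foldl_map]
      exact pv_fold_set (List.range n2) (fun c row => row.set r (row.getD r "" ++ G h r c)) [] h grid
    have hu : ∀ (r : Nat) (b : List String),
        (List.range n2).foldl (fun row c => row.set r (row.getD r "" ++ G h r c)) b
          = b.set r ((List.range n2).foldl (fun s c => s ++ G h r c) (b.getD r "")) :=
      fun r b => pv_fold_set (List.range n2) (fun c s => s ++ G h r c) "" r b
    simp only [hr, hu]
    exact pv_fold_set (List.range n1)
      (fun r b => b.set r ((List.range n2).foldl (fun s c => s ++ G h r c) (b.getD r ""))) [] h grid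
  simp only [hstep]
  rw [pv_fold_set_range ([] : List String)
    (fun h b => (List.range n1).foldl
      (fun b r => b.set r ((List.range n2).foldl (fun s c => s ++ G h r c) (b.getD r ""))) b)
    n0 _ (by simp)]
  rw [List.drop_eq_nil_of_le (by simp), List.append_nil]
  refine List.map_congr_left fun h hh => ?_
  have hg : ((List.range n0).map fun _ => (List.range n1).map fun _ => ("" : String)).getD h []
      = (List.range n1).map fun _ => ("" : String) := by
    rw [List.getD_eq_getElem _ _ (by simpa using List.mem_range.mp hh)]
    simp
  rw [hg, pv_fold_set_range ("" : String)
    (fun r s => (List.range n2).foldl (fun s c => s ++ G h r c) s) n1 _ (by simp)]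
  rw [List.drop_eq_nil_of_le (by simp), List.append_nil]
  refine List.map_congr_left fun r hr => ?_
  congr 1
  rw [List.getD_eq_getElem _ _ (by simpa using List.mem_range.mp hr)]
  simp

theorem pv_bridge (n0 n1 n2 : Nat) (F : Int × Int × Int → String) :
    ((PySem.List.pyRange 0 (n0 : Int) 1).flatMap fun a0 =>
      (PySem.List.pyRange 0 (n1 : Int) 1).flatMap fun a1 =>
        (PySem.List.pyRange 0 (n2 : Int) 1).map fun a2 => (a0, a1, a2)).foldl
      (fun grid (x : Int × Int × Int) =>
        PySem.List.pySetD grid x.1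
          (PySem.List.pySetD (PySem.List.pyGetD grid x.1 []) x.2.1
            ((PySem.List.pyGetD (PySem.List.pyGetD grid x.1 []) x.2.1 "") ++ F x)))
      ((PySem.List.pyRange 0 (n0 : Int) 1).map fun _ => (PySem.List.pyRange 0 (n1 : Int) 1).map fun _ => "")
    = (PySem.List.pyRange 0 (n0 : Int) 1).map fun h =>
        (PySem.List.pyRange 0 (n1 : Int) 1).map fun r =>
          (PySem.List.pyRange 0 (n2 : Int) 1).foldl (fun s c => s ++ F (h, r, c)) "" := by
  rw [PySem.List.pyRange_zero_natCast n0, PySem.List.pyRange_zero_natCast n1,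
    PySem.List.pyRange_zero_natCast n2]
  rw [pv_prod_map (α := Nat) (β := Int) (List.range n0) (List.range n1) (List.range n2)
    (fun (k : Nat) => (k : Int)) (fun (k : Nat) => (k : Int)) (fun (k : Nat) => (k : Int))]
  rw [List.foldl_map]
  simp only [PySem.List.pySetD_natCast, PySem.List.pyGetD_natCast, List.map_map, List.foldl_map]
  exact pv_core n0 n1 n2 (fun h r c => F ((h : Int), (r : Int), (c : Int)))

theorem pv_r3 : PySem.List.pyRange 0 3 1 = [0, 1, 2] := by decide

-- ---- grid abstraction ----
def pvGrid (n0 n1 n2 : Nat) (g : Nat → Nat → Nat → Char) : List (List String) :=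
  (List.range n0).map fun a => (List.range n1).map fun b =>
    String.ofList ((List.range n2).map fun c => g a b c)

def pvG0 (piece : List (List String)) (a b c : Nat) : Char :=
  (((piece.getD a []).getD b "").toList).getD c default

theorem pv_rev_map {α : Type} (n : Nat) (f : Nat → α) :
    ((List.range n).map f).reverse = (List.range n).map fun i => f (n - 1 - i) := by
  apply List.ext_getElem (by simp)
  intro i h1 h2
  rw [List.getElem_reverse]
  simp only [List.getElem_map, List.getElem_range, List.length_map, List.length_range]

theorem pv_grid_congr {n0 n1 n2 : Nat} {g g' : Nat → Nat → Nat → Char}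
    (h : ∀ a < n0, ∀ b < n1, ∀ c < n2, g a b c = g' a b c) :
    pvGrid n0 n1 n2 g = pvGrid n0 n1 n2 g' := by
  unfold pvGrid
  refine List.map_congr_left fun a ha => ?_
  refine List.map_congr_left fun b hb => ?_
  congr 1
  refine List.map_congr_left fun c hc => ?_
  exact h a (List.mem_range.mp ha) b (List.mem_range.mp hb) c (List.mem_range.mp hc)

-- reversal stages (the three conditional mirrors in B), as pvGrid rewrites
theorem pv_rev0 {n0 n1 n2 : Nat} {g : Nat → Nat → Nat → Char} (c : Prop) [Decidable c] :
    (if c then (pvGrid n0 n1 n2 g).reverse else pvGrid n0 n1 n2 g)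
      = pvGrid n0 n1 n2 (fun a b cc => g (if c then n0 - 1 - a else a) b cc) := by
  by_cases h : c
  · simp only [if_pos h, pvGrid, pv_rev_map]
  · simp only [if_neg h]

theorem pv_rev1 {n0 n1 n2 : Nat} {g : Nat → Nat → Nat → Char} (c : Prop) [Decidable c] :
    (if c then (pvGrid n0 n1 n2 g).map (fun layer => layer.reverse) else pvGrid n0 n1 n2 g)
      = pvGrid n0 n1 n2 (fun a b cc => g a (if c then n1 - 1 - b else b) cc) := by
  by_cases h : c
  · simp only [if_pos h, pvGrid, List.map_map, Function.comp_def, pv_rev_map]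
  · simp only [if_neg h]

theorem pv_rev2 {n0 n1 n2 : Nat} {g : Nat → Nat → Nat → Char} (c : Prop) [Decidable c] :
    (if c then (pvGrid n0 n1 n2 g).map (fun layer => layer.map (fun s => String.ofList s.toList.reverse)) else pvGrid n0 n1 n2 g)
      = pvGrid n0 n1 n2 (fun a b cc => g a b (if c then n2 - 1 - cc else cc)) := by
  by_cases h : c
  · simp only [if_pos h, pvGrid, List.map_map, Function.comp_def, String.toList_ofList, pv_rev_map]
  · simp only [if_neg h]

theorem pv_getD3_m1 {α : Type} (x y z : α) (d : α) :
    PySem.List.pyGetD [x, y, z] (-1) d = z := by rfl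

theorem pv_getD3_m2 {α : Type} (x y z : α) (d : α) :
    PySem.List.pyGetD [x, y, z] (-2) d = y := by rfl

theorem pv_getD3_m3 {α : Type} (x y z : α) (d : α) :
    PySem.List.pyGetD [x, y, z] (-3) d = x := by rfl

theorem pv_pyGet (xs : List Char) (z : Int) (h0 : 0 ≤ z) (h : z < (xs.length : Int)) :
    PySem.List.pyGet? xs z = some (xs[z.toNat]'(by omega)) := by
  obtain ⟨n, rfl⟩ : ∃ n : Nat, z = (n : Int) := ⟨z.toNat, by omega⟩
  have hn : n < xs.length := by omega
  rw [PySem.List.pyGet?_natCast]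
  simp [List.getElem?_eq_getElem hn]

-- the per-cell character both programs extract, at in-range Nat coordinates
theorem pv_str1N (piece : List (List String)) (x y z : Nat)
    (hx : x < piece.length) (hy : y < (piece.getD x []).length)
    (hz : z < ((piece.getD x []).getD y "").toList.length) :
    pvStr1 piece (x : Int) (y : Int) (z : Int) = String.ofList [pvG0 piece x y z] := by
  rw [pvStr1, PySem.List.pyGetD_natCast, PySem.List.pyGetD_natCast]
  have hget : PySem.Str.pyGet? ((piece.getD x []).getD y "") (z : Int)
      = some (((piece.getD x []).getD y "").toList[z]'hz) := by
    have hb : PySem.Str.pyGet? ((piece.getD x []).getD y "") (z : Int)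
        = PySem.List.pyGet? ((piece.getD x []).getD y "").toList (z : Int) := by simp [pysem]
    rw [hb, pv_pyGet _ _ (by omega) (by exact_mod_cast hz)]
    simp
  rw [hget]
  unfold pvG0
  rw [List.getD_eq_getElem _ default hz]

-- ''.join over the gathered chars: String.join is the fold of ++
theorem pv_join (l : List String) : String.join l = l.foldl (· ++ ·) "" := rfl

-- string fold of one-char pieces = ofList of the char map
theorem pv_foldl_str_nat (n : Nat) (F : Int → String) (G : Nat → Char)
    (h : ∀ k < n, F (k : Int) = String.ofList [G k]) :
    (List.range n).foldl (fun s (k : Nat) => s ++ F (k : Int)) "" = String.ofList ((List.range n).map G) := by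
  induction n with
  | zero => simp
  | succ n ih =>
    rw [List.range_succ, List.foldl_append, List.map_append,
      ih (fun k hk => h k (by omega))]
    simp only [List.foldl_cons, List.foldl_nil, List.map_cons, List.map_nil]
    rw [h n (by omega), String.ofList_append]

theorem pv_map_natCast {α : Type} (n : Nat) (f : Int → α) :
    (PySem.List.pyRange 0 (n : Int) 1).map f = (List.range n).map (fun (k : Nat) => f (k : Int)) := by
  rw [PySem.List.pyRange_zero_natCast, List.map_map]
  rfl

theorem pv_A_grid (n0 n1 n2 : Nat) (F : Int × Int × Int → String) (G : Nat → Nat → Nat → Char)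
    (h : ∀ a < n0, ∀ b < n1, ∀ c < n2, F ((a : Int), (b : Int), (c : Int)) = String.ofList [G a b c]) :
    ((PySem.List.pyRange 0 (n0 : Int) 1).map fun h' =>
      (PySem.List.pyRange 0 (n1 : Int) 1).map fun r =>
        (PySem.List.pyRange 0 (n2 : Int) 1).foldl (fun s c => s ++ F (h', r, c)) "")
    = pvGrid n0 n1 n2 G := by
  rw [pv_map_natCast]
  unfold pvGrid
  refine List.map_congr_left fun a ha => ?_
  rw [pv_map_natCast]
  refine List.map_congr_left fun b hb => ?_
  rw [PySem.List.pyRange_zero_natCast, List.foldl_map]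
  exact pv_foldl_str_nat n2 (fun z => F ((a : Int), (b : Int), z)) _
    (fun k hk => h a (List.mem_range.mp ha) b (List.mem_range.mp hb) k hk)

-- the inverse-axis list that last-write-wins assignment produces, named by pvInvAt
theorem pv_chain (a0 a1 a2 : Int) (h00 : -3 ≤ a0) (h01 : a0 < 3) (h10 : -3 ≤ a1)
    (h11 : a1 < 3) (h20 : -3 ≤ a2) (h21 : a2 < 3) :
    PySem.List.pySetD (PySem.List.pySetD (PySem.List.pySetD [0, 0, 0] a0 0) a1 1) a2 2
      = [((pvInvAt (a0, a1, a2) 0 : Nat) : Int), ((pvInvAt (a0, a1, a2) 1 : Nat) : Int),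
        ((pvInvAt (a0, a1, a2) 2 : Nat) : Int)] := by
  interval_cases a0 <;> interval_cases a1 <;> interval_cases a2 <;> decide

-- the dimension dim[v] selected by a possibly negative axis index, named by pvDimAt
theorem pv_dim_eq (piece : List (List String)) (v : Int) (h1 : -3 ≤ v) (h2 : v < 3) :
    PySem.List.pyGetD [(piece.length : Int), ((piece.getD 0 []).length : Int),
      ((((piece.getD 0 []).getD 0 "").toList.length : Nat) : Int)] v 0
      = ((pvDimAt piece v : Nat) : Int) := by
  interval_cases v <;>
    simp [pvDimAt, PySem.List.pyGetD_ofNat', pv_getD3_m1, pv_getD3_m2, pv_getD3_m3]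

theorem pv_getD_cast3 (x y z : Nat) (p : Nat) :
    List.getD [(x : Int), (y : Int), (z : Int)] p 0 = ((List.getD [x, y, z] p 0 : Nat) : Int) := by
  rcases p with _ | _ | _ | n
  · rfl
  · rfl
  · rfl
  · rw [List.getD_eq_default _ _ (by simp), List.getD_eq_default _ _ (by simp)]
    rfl

-- ===== VERDICT (by name: the statement is the Claim_ definition above) =====
set_option maxHeartbeats 2000000 in
theorem transform_spec : Claim_equal_transform := by
  intro piece axes negatives _ hpre
  obtain ⟨a0, a1, a2⟩ := axes
  obtain ⟨hne, hr0, ⟨hb00, hb01⟩, ⟨hb10, hb11⟩, ⟨hb20, hb21⟩, hbox⟩ := hpre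
  unfold Spec_transform
  simp only [transform, transform_alt, pv_r3, List.foldl_cons, List.foldl_nil,
    PySem.List.pyGetD_ofNat', List.getD_cons_zero, List.getD_cons_succ, PySem.Str.len,
    List.nil_append, List.cons_append, PySem.List.foldl_append_singleton_eq_map,
    PySem.List.enumerate_cons, PySem.List.enumerate_nil,
    show (0 : Int) + 1 = 1 from rfl, show (1 : Int) + 1 = 2 from rfl]
  rw [pv_chain a0 a1 a2 hb00 hb01 hb10 hb11 hb20 hb21]
  simp only [pv_dim_eq piece a0 hb00 hb01, pv_dim_eq piece a1 hb10 hb11,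
    pv_dim_eq piece a2 hb20 hb21, List.getD_cons_zero, List.getD_cons_succ,
    PySem.List.pyGetD_ofNat', PySem.List.pyGetD_natCast]
  simp only [pv_numax, pv_prod_map, pv_zip_self_map, List.foldl_map]
  rw [pv_bridge]
  simp only [pv_join, List.foldl_map]
  simp only [List.mem_range] at hbox
  have hA := pv_A_grid (pvDimAt piece a0) (pvDimAt piece a1) (pvDimAt piece a2)
    (fun t => pvStr1 piece
      (List.getD [if negatives.1 = 0 then t.1 else ((pvDimAt piece a0 : Nat) : Int) - 1 - t.1,
        if negatives.2.1 = 0 then t.2.1 else ((pvDimAt piece a1 : Nat) : Int) - 1 - t.2.1,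
        if negatives.2.2 = 0 then t.2.2 else ((pvDimAt piece a2 : Nat) : Int) - 1 - t.2.2]
        (pvInvAt (a0, a1, a2) 0) 0)
      (List.getD [if negatives.1 = 0 then t.1 else ((pvDimAt piece a0 : Nat) : Int) - 1 - t.1,
        if negatives.2.1 = 0 then t.2.1 else ((pvDimAt piece a1 : Nat) : Int) - 1 - t.2.1,
        if negatives.2.2 = 0 then t.2.2 else ((pvDimAt piece a2 : Nat) : Int) - 1 - t.2.2]
        (pvInvAt (a0, a1, a2) 1) 0)
      (List.getD [if negatives.1 = 0 then t.1 else ((pvDimAt piece a0 : Nat) : Int) - 1 - t.1,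
        if negatives.2.1 = 0 then t.2.1 else ((pvDimAt piece a1 : Nat) : Int) - 1 - t.2.1,
        if negatives.2.2 = 0 then t.2.2 else ((pvDimAt piece a2 : Nat) : Int) - 1 - t.2.2]
        (pvInvAt (a0, a1, a2) 2) 0))
    (fun a b c => pvG0 piece
      (List.getD [if negatives.1 = 0 then a else pvDimAt piece a0 - 1 - a,
        if negatives.2.1 = 0 then b else pvDimAt piece a1 - 1 - b,
        if negatives.2.2 = 0 then c else pvDimAt piece a2 - 1 - c] (pvInvAt (a0, a1, a2) 0) 0)
      (List.getD [if negatives.1 = 0 then a else pvDimAt piece a0 - 1 - a,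
        if negatives.2.1 = 0 then b else pvDimAt piece a1 - 1 - b,
        if negatives.2.2 = 0 then c else pvDimAt piece a2 - 1 - c] (pvInvAt (a0, a1, a2) 1) 0)
      (List.getD [if negatives.1 = 0 then a else pvDimAt piece a0 - 1 - a,
        if negatives.2.1 = 0 then b else pvDimAt piece a1 - 1 - b,
        if negatives.2.2 = 0 then c else pvDimAt piece a2 - 1 - c] (pvInvAt (a0, a1, a2) 2) 0))
    (by
      intro a ha b hb c hc
      dsimp only
      rw [show (if negatives.1 = 0 then ((a : Nat) : Int) else ((pvDimAt piece a0 : Nat) : Int) - 1 - ((a : Nat) : Int))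
            = (((if negatives.1 = 0 then a else pvDimAt piece a0 - 1 - a : Nat) : Nat) : Int) from by
          split_ifs <;> push_cast <;> omega,
        show (if negatives.2.1 = 0 then ((b : Nat) : Int) else ((pvDimAt piece a1 : Nat) : Int) - 1 - ((b : Nat) : Int))
            = (((if negatives.2.1 = 0 then b else pvDimAt piece a1 - 1 - b : Nat) : Nat) : Int) from by
          split_ifs <;> push_cast <;> omega,
        show (if negatives.2.2 = 0 then ((c : Nat) : Int) else ((pvDimAt piece a2 : Nat) : Int) - 1 - ((c : Nat) : Int))
            = (((if negatives.2.2 = 0 then c else pvDimAt piece a2 - 1 - c : Nat) : Nat) : Int) from by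
          split_ifs <;> push_cast <;> omega]
      simp only [pv_getD_cast3]
      obtain ⟨hx1, hy1, hz1⟩ := hbox (if negatives.1 = 0 then a else pvDimAt piece a0 - 1 - a)
        (by split_ifs <;> omega) (if negatives.2.1 = 0 then b else pvDimAt piece a1 - 1 - b)
        (by split_ifs <;> omega) (if negatives.2.2 = 0 then c else pvDimAt piece a2 - 1 - c)
        (by split_ifs <;> omega)
      exact pv_str1N piece _ _ _ hx1 hy1 hz1)
  simp only [] at hA
  rw [hA]
  have hB := pv_A_grid (pvDimAt piece a0) (pvDimAt piece a1) (pvDimAt piece a2)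
    (fun t => pvStr1 piece (List.getD [t.1, t.2.1, t.2.2] (pvInvAt (a0, a1, a2) 0) 0)
      (List.getD [t.1, t.2.1, t.2.2] (pvInvAt (a0, a1, a2) 1) 0)
      (List.getD [t.1, t.2.1, t.2.2] (pvInvAt (a0, a1, a2) 2) 0))
    (fun a b c => pvG0 piece (List.getD [a, b, c] (pvInvAt (a0, a1, a2) 0) 0)
      (List.getD [a, b, c] (pvInvAt (a0, a1, a2) 1) 0)
      (List.getD [a, b, c] (pvInvAt (a0, a1, a2) 2) 0))
    (by
      intro a ha b hb c hc
      dsimp only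
      simp only [pv_getD_cast3]
      obtain ⟨hx1, hy1, hz1⟩ := hbox a ha b hb c hc
      exact pv_str1N piece _ _ _ hx1 hy1 hz1)
  simp only [] at hB
  rw [hB]
  simp only [pv_rev0, pv_rev1, pv_rev2]
  refine pv_grid_congr ?_
  intro a ha b hb c hc
  dsimp only
  rw [show (if negatives.1 ≠ 0 then pvDimAt piece a0 - 1 - a else a)
        = (if negatives.1 = 0 then a else pvDimAt piece a0 - 1 - a) from by split_ifs <;> omega,
    show (if negatives.2.1 ≠ 0 then pvDimAt piece a1 - 1 - b else b)
        = (if negatives.2.1 = 0 then b else pvDimAt piece a1 - 1 - b) from by split_ifs <;> omega,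
    show (if negatives.2.2 ≠ 0 then pvDimAt piece a2 - 1 - c else c)
        = (if negatives.2.2 = 0 then c else pvDimAt piece a2 - 1 - c) from by split_ifs <;> omega]
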